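-- pv_equiv track=rewrite | github.com/EmiliyaSugiyama/algorithmshse | HWalg2.py | find_best_deals
-- ===== SOURCE A (Python) =====
-- def find_best_deals(data):
--     # Разделяем входные данные на заголовок и информацию о магазинах
--     header = data[0][1:].split('\t')
--     stores_data = data[1:]
--
--     # Создаем словарь для хранения цен по каждой книге
--     book_prices = {}
--
--     # Извлекаем информацию о книгах и ценах из каждой строки данных
--     for row in stores_data:
--         store_data = row.split('\t')
--         store_name = store_data[0]
--         prices = list(map(int, store_data[1:]))
--
--         # Используем функцию zip, чтобы объединить заголовок и цены вместе
--         for book, price in zip(header, prices):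
--             if book not in book_prices:
--                 book_prices[book] = {}
--
--             book_prices[book][store_name] = price
--
--     # Ищем самый выгодный магазин для каждой книги
--     best_deals = []
--     for book, prices in book_prices.items():
--         best_store = min(prices, key=prices.get)
--         best_price = prices[best_store]
--         best_deals.append((book, best_store, best_price))
--
--     # Сортируем результаты по порядку книг из заголовка
--     best_deals.sort(key=lambda x: header.index(x[0]))
--
--     return best_deals
-- ===== SOURCE B (Python) =====
-- def find_best_deals(data):
--     # Parse once: header books, then each row into (store_name, [int prices]).
--     header = data[0][1:].split('\t')
--     stores = []
--     for row in data[1:]: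
--         parts = row.split('\t')
--         stores.append((parts[0], [int(x) for x in parts[1:]]))
--
--     # One column-major pass: for each book keep a running minimum over the stores
--     # (strict <, so the earliest store wins ties); skip books no store priced.
--     result = []
--     for j, book in enumerate(header):
--         best = None
--         for name, prices in stores:
--             if j < len(prices) and (best is None or prices[j] < best[1]):
--                 best = (name, prices[j])
--         if best is not None:
--             result.append((book, best[0], best[1]))
--     return result
-- ===== Notes on version B (the rewrite author's own statement) =====
-- stated objective: simpler
-- what changed: B replaces A's nested dict-of-dicts (book -> store -> price) plus per-book min() and a final sort keyed by quadratic header.index with a single column-major pass: for each header column in order it scans the parsed store rows once keeping a running minimum (strict <, earliest store wins ties), so no dict and no sort are needed.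
-- outside the precondition, e.g. on find_best_deals(['#a\ta', 's\t1\t2']): A returns [('a', 's', 2)], B returns [('a', 's', 1), ('a', 's', 2)]; on find_best_deals(['#a', 's\t1', 's\t2']): A returns [('a', 's', 2)], B returns [('a', 's', 1)]
import Mathlib
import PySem

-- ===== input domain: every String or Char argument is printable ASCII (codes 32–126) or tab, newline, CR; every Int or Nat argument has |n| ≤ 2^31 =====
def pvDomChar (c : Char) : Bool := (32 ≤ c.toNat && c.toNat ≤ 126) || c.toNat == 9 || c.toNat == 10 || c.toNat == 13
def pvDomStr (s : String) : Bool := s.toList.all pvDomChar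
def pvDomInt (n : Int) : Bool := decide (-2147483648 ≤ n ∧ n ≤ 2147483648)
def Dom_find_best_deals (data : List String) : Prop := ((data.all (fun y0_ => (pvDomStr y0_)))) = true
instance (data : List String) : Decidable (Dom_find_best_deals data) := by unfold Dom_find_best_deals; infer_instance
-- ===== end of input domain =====

-- B replaces A's nested dict-of-dicts plus per-book min() and a final sort keyed by header.index
-- with a single column-major pass keeping a running minimum per header column (objective: simpler).

-- ===== PORT A =====
-- data[0] is read with headD "" (IndexError on empty data is excluded by Pre_);
-- int(f) is (PySem.Int.ofStr? f).getD 0 (ValueError is excluded by Pre_).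
def pvSplitTabA (s : String) : List String := (PySem.Str.split? s "\t").getD []

-- `if book not in book_prices: book_prices[book] = {}` then `book_prices[book][store_name] = price`
def pvRowStep (store_name : String) (bp : PySem.Dict String (PySem.Dict String Int))
    (bkpr : String × Int) : PySem.Dict String (PySem.Dict String Int) :=
  bp.insert bkpr.1 ((bp.getD bkpr.1 PySem.Dict.empty).insert store_name bkpr.2)

-- one iteration of `for row in stores_data`
def pvABuild (header : List String) (bp : PySem.Dict String (PySem.Dict String Int))
    (row : String) : PySem.Dict String (PySem.Dict String Int) :=
  let store_data := pvSplitTabA row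
  let store_name := store_data.headD ""
  let prices := store_data.tail.map (fun f => (PySem.Int.ofStr? f).getD 0)
  (header.zip prices).foldl (pvRowStep store_name) bp

-- one iteration of `for book, prices in book_prices.items()`; `min(prices, key=prices.get)`
-- is PySem.List.min? over the keys (every key is present, so prices.get is getD _ 0)
def pvAPick (acc : List (String × String × Int)) (bp : String × PySem.Dict String Int) :
    List (String × String × Int) :=
  match PySem.List.min? bp.2.keys (fun s => bp.2.getD s 0) with
  | some best_store => acc ++ [(bp.1, best_store, bp.2.getD best_store 0)]
  | none => acc   -- min() over an empty inner dict never happens: every entry holds ≥ 1 store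

def find_best_deals (data : List String) : List (String × String × Int) :=
  let header := pvSplitTabA (PySem.Str.slice (data.headD "") (some 1) none)
  let stores_data := data.tail
  let book_prices := stores_data.foldl (pvABuild header) PySem.Dict.empty
  let best_deals := book_prices.items.foldl pvAPick []
  PySem.List.sorted best_deals (fun x => (PySem.List.index? header x.1).getD 0)

-- ===== PORT B =====
def pvSplitTabB (s : String) : List String := (PySem.Str.split? s "\t").getD []

-- one row parsed into (store name, list of int prices)
def pvParseRow (row : String) : String × List Int :=
  let parts := pvSplitTabB row
  (parts.headD "", parts.tail.map (fun f => (PySem.Int.ofStr? f).getD 0))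

-- loop body of the store scan: `if j < len(prices) and (best is None or prices[j] < best[1])`
-- (`j < len(prices)` followed by `prices[j]` is the guarded access `sp.2[j]?`)
def pvBStep (j : Nat) (best : Option (String × Int)) (sp : String × List Int) :
    Option (String × Int) :=
  match sp.2[j]? with
  | none => best
  | some p =>
    match best with
    | none => some (sp.1, p)
    | some b => if p < b.2 then some (sp.1, p) else some b

-- running minimum over the stores for column j
def pvBestAt (stores : List (String × List Int)) (j : Nat) : Option (String × Int) :=
  stores.foldl (pvBStep j) none

-- one iteration of `for j, book in enumerate(header)` (j is the Int enumerate yields; as a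
-- list index it is its toNat, j being always ≥ 0)
def pvBEmit (stores : List (String × List Int)) (res : List (String × String × Int))
    (jb : Int × String) : List (String × String × Int) :=
  match pvBestAt stores jb.1.toNat with
  | some b => res ++ [(jb.2, b.1, b.2)]
  | none => res

def find_best_deals_alt (data : List String) : List (String × String × Int) :=
  let header := pvSplitTabB (PySem.Str.slice (data.headD "") (some 1) none)
  let stores := data.tail.map pvParseRow
  (PySem.List.enumerate header).foldl (pvBEmit stores) []

-- ===== PRECONDITION & SPEC =====
-- Pre_ excludes: empty data (A raises IndexError); rows with a price field int() rejects (A raises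
-- ValueError); and inputs with duplicate book names in the header or duplicate store names among the
-- rows, on which A's dict-overwrite behaviour (last write wins, first-insertion order) is accidental.
def Pre_find_best_deals (data : List String) : Prop :=
  data ≠ [] ∧
  (∀ row ∈ data.tail, ∀ f ∈ ((PySem.Str.split? row "\t").getD []).tail,
      (PySem.Int.ofStr? f).isSome = true) ∧
  ((PySem.Str.split? (PySem.Str.slice (data.headD "") (some 1) none) "\t").getD []).Nodup ∧
  (data.tail.map (fun row => ((PySem.Str.split? row "\t").getD []).headD "")).Nodup
instance (data : List String) : Decidable (Pre_find_best_deals data) := by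
  unfold Pre_find_best_deals; infer_instance

def pvWitness_find_best_deals : List String := ["#A\tB", "s1\t3\t5", "s2\t2\t7"]

def Spec_find_best_deals (data : List String) (out : List (String × String × Int)) : Prop := out = find_best_deals_alt data
instance (data : List String) (out : List (String × String × Int)) : Decidable (Spec_find_best_deals data out) := by unfold Spec_find_best_deals; infer_instance

-- ===== CLAIM (what is proved, stated in full; the proofs are below) =====
def Claim_equal_find_best_deals : Prop := ∀ (data : List String), Dom_find_best_deals data → Pre_find_best_deals data → Spec_find_best_deals data (find_best_deals data)

-- ===== LEMMAS AND PROOFS =====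

-- proof-side shapes
def pvBuildStep (H : List String) (bp : PySem.Dict String (PySem.Dict String Int))
    (sp : String × List Int) : PySem.Dict String (PySem.Dict String Int) :=
  (H.zip sp.2).foldl (pvRowStep sp.1) bp

def pvColList (S : List (String × List Int)) (j : Nat) : List (String × Int) :=
  S.filterMap (fun sp => (sp.2[j]?).map (fun p => (sp.1, p)))

def pvPairStep (best : Option (String × Int)) (e : String × Int) : Option (String × Int) :=
  match best with
  | none => some e
  | some b => if e.2 < b.2 then some e else some b

-- the entry both programs produce for book k (junk second branch is never reached)
def pvF (H : List String) (S : List (String × List Int)) (k : String) : String × String × Int :=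
  match (pvColList S ((PySem.List.index? H k).getD 0)).foldl pvPairStep none with
  | some b => (k, b.1, b.2)
  | none => (k, k, 0)

lemma pvF_fst (H : List String) (S : List (String × List Int)) (k : String) :
    (pvF H S k).1 = k := by
  unfold pvF
  cases (pvColList S ((PySem.List.index? H k).getD 0)).foldl pvPairStep none <;> rfl

def pvOptApp {α β : Type} (f : α → Option β) (r : List β) (x : α) : List β :=
  match f x with
  | some y => r ++ [y]
  | none => r

lemma pvFoldlAppendOpt {α β : Type} (f : α → Option β) (l : List α) (acc : List β) :
    l.foldl (pvOptApp f) acc = acc ++ l.filterMap f := by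
  induction l generalizing acc with
  | nil => simp
  | cons a t ih => cases h : f a <;> simp [pvOptApp, h, ih]

lemma pvZipFoldGet (zl : List (String × Int)) (hz : (zl.map Prod.fst).Nodup) (n : String)
    (bp : PySem.Dict String (PySem.Dict String Int)) (k : String) :
    ((zl.foldl (pvRowStep n) bp).get? k) =
      match zl.find? (fun q => q.1 == k) with
      | some q => some ((bp.getD k PySem.Dict.empty).insert n q.2)
      | none => bp.get? k := by
  induction zl generalizing bp with
  | nil => simp
  | cons a t ih =>
    simp only [List.map_cons, List.nodup_cons] at hz
    obtain ⟨ha, ht⟩ := hz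
    rw [List.foldl_cons, ih ht]
    by_cases hk : a.1 = k
    · have hfind : t.find? (fun q => q.1 == k) = none := by
        rw [List.find?_eq_none]
        intro q hq hbeq
        apply ha
        have hqk : q.1 = k := by simpa using hbeq
        rw [hk, ← hqk]
        exact List.mem_map_of_mem hq
      simp only [List.find?_cons, hk, beq_self_eq_true, hfind]
      unfold pvRowStep
      rw [hk, PySem.Dict.get?_insert_self]
    · have hbeq : (a.1 == k) = false := beq_eq_false_iff_ne.2 hk
      simp only [List.find?_cons, hbeq]
      unfold pvRowStep
      cases hf : t.find? (fun q => q.1 == k) with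
      | some q =>
        simp only [hf]
        rw [PySem.Dict.getD_eq_get?_getD, PySem.Dict.get?_insert_of_ne _ _ (Ne.symm hk),
          ← PySem.Dict.getD_eq_get?_getD]
      | none =>
        simp only [hf]
        exact PySem.Dict.get?_insert_of_ne _ _ (Ne.symm hk)

lemma pvFindZipIndex (H : List String) (ps : List Int) (k : String) :
    (H.zip ps).find? (fun q => q.1 == k) =
      match PySem.List.index? H k with
      | some j => (ps[j]?).map (fun p => (k, p))
      | none => none := by
  induction H generalizing ps with
  | nil => simp [PySem.List.index?_eq_idxOf?]
  | cons h t ih =>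
    cases ps with
    | nil =>
      cases hidx : PySem.List.index? (h :: t) k <;> simp [hidx]
    | cons p pt =>
      by_cases hk : h = k
      · subst hk
        rw [PySem.List.index?_cons_self]
        simp
      · have hbeq : (h == k) = false := beq_eq_false_iff_ne.2 hk
        rw [PySem.List.index?_cons_of_ne _ hk]
        simp only [List.zip_cons_cons, List.find?_cons, hbeq]
        rw [ih pt]
        cases hidx : PySem.List.index? t k <;> simp [hidx]

lemma pvNodupZipFst {H : List String} (ps : List Int) (hH : H.Nodup) :
    ((H.zip ps).map Prod.fst).Nodup := by
  induction H generalizing ps with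
  | nil => simp
  | cons h t ih =>
    cases ps with
    | nil => simp
    | cons p pt =>
      simp only [List.nodup_cons] at hH
      simp only [List.zip_cons_cons, List.map_cons, List.nodup_cons]
      refine ⟨fun hm => hH.1 ?_, ih pt hH.2⟩
      obtain ⟨⟨a, b⟩, hq, hq1⟩ := List.mem_map.1 hm
      cases hq1
      exact (List.of_mem_zip hq).1

lemma pvColListKeys {S : List (String × List Int)} {j : Nat} {e : String × Int}
    (he : e ∈ pvColList S j) : e.1 ∈ S.map Prod.fst := by
  obtain ⟨sp, hsp, hm⟩ := List.mem_filterMap.1 he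
  cases hp : sp.2[j]? with
  | none => rw [hp] at hm; simp at hm
  | some p =>
    rw [hp] at hm
    simp only [Option.map_some, Option.some_inj] at hm
    exact hm ▸ List.mem_map_of_mem hsp

lemma pvMkAppend (l : List (String × Int)) (n : String) (p : Int)
    (hn : n ∉ l.map Prod.fst) :
    (PySem.Dict.mk l).insert n p = PySem.Dict.mk (l ++ [(n, p)]) := by
  apply PySem.Dict.ext
  rw [PySem.Dict.items_insert_of_not_contains]
  rw [PySem.Dict.contains_mk]
  simp only [List.any_eq_false]
  intro q hq hbeq
  exact hn ((beq_iff_eq.1 hbeq) ▸ List.mem_map_of_mem hq)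

lemma pvEmptyInsert (n : String) (p : Int) :
    (PySem.Dict.empty : PySem.Dict String Int).insert n p = PySem.Dict.mk [(n, p)] := by
  apply PySem.Dict.ext
  rw [PySem.Dict.items_insert_of_not_contains _ _ (PySem.Dict.contains_empty _)]
  rfl

lemma pvBuildGet (H : List String) (hH : H.Nodup) (S : List (String × List Int))
    (hN : (S.map Prod.fst).Nodup) (k : String) :
    ((S.foldl (pvBuildStep H) PySem.Dict.empty).get? k) =
      match PySem.List.index? H k with
      | some j => if pvColList S j = [] then none else some (PySem.Dict.mk (pvColList S j))
      | none => none := by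
  induction S using List.reverseRecOn with
  | nil =>
    cases hidx : PySem.List.index? H k <;>
      simp [pvColList, PySem.Dict.get?_empty, hidx]
  | append_singleton S sp ih =>
    have hN2 : ((S.map Prod.fst) ++ [sp.1]).Nodup := by simpa using hN
    have hN' : (S.map Prod.fst).Nodup ∧ sp.1 ∉ S.map Prod.fst := by
      have h3 := List.nodup_append.1 hN2
      exact ⟨h3.1, fun hmem => h3.2.2 sp.1 hmem sp.1 (List.mem_singleton_self _) rfl⟩
    rw [List.foldl_append, List.foldl_cons, List.foldl_nil]
    show ((H.zip sp.2).foldl (pvRowStep sp.1) (S.foldl (pvBuildStep H) PySem.Dict.empty)).get? k = _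
    rw [pvZipFoldGet _ (pvNodupZipFst _ hH) _ _ k, pvFindZipIndex]
    cases hidx : PySem.List.index? H k with
    | none =>
      simp only [hidx]
      rw [ih hN'.1, hidx]
    | some j =>
      simp only [hidx]
      have hcol : pvColList (S ++ [sp]) j
          = pvColList S j ++ ((sp.2[j]?).map (fun p => (sp.1, p))).toList := by
        simp only [pvColList, List.filterMap_append, List.filterMap_cons, List.filterMap_nil]
        cases sp.2[j]? <;> simp
      have ihs : (List.foldl (pvBuildStep H) PySem.Dict.empty S).get? k
          = if pvColList S j = [] then none else some (PySem.Dict.mk (pvColList S j)) := by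
        rw [ih hN'.1, hidx]
      cases hp : sp.2[j]? with
      | none =>
        simp only [hp, Option.map_none]
        rw [ihs]
        simp [hcol, hp]
      | some p =>
        simp only [hp, Option.map_some]
        rw [PySem.Dict.getD_eq_get?_getD, ihs]
        by_cases hemp : pvColList S j = []
        · rw [if_pos hemp]
          simp only [Option.getD_none]
          rw [pvEmptyInsert sp.1 p]
          simp [hcol, hp, hemp]
        · rw [if_neg hemp]
          simp only [Option.getD_some]
          have hn : sp.1 ∉ (pvColList S j).map Prod.fst := by
            intro hmem
            obtain ⟨e, he, he1⟩ := List.mem_map.1 hmem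
            exact hN'.2 (he1 ▸ pvColListKeys he)
          rw [pvMkAppend _ sp.1 p hn]
          simp [hcol, hp]

lemma pvNodupKeysBuild (H : List String) (S : List (String × List Int)) :
    ((S.foldl (pvBuildStep H) PySem.Dict.empty)).keys.Nodup := by
  have inner : ∀ (zl : List (String × Int)) (n : String)
      (bp : PySem.Dict String (PySem.Dict String Int)),
      bp.keys.Nodup → (zl.foldl (pvRowStep n) bp).keys.Nodup := by
    intro zl n
    induction zl with
    | nil => intro bp h; exact h
    | cons a t ih =>
      intro bp h
      exact ih _ (PySem.Dict.nodup_keys_insert _ _ _ h)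
  have outer : ∀ (S' : List (String × List Int))
      (bp : PySem.Dict String (PySem.Dict String Int)),
      bp.keys.Nodup → (S'.foldl (pvBuildStep H) bp).keys.Nodup := by
    intro S'
    induction S' with
    | nil => intro bp h; exact h
    | cons sp t ih =>
      intro bp h
      exact ih _ (inner _ _ _ h)
  exact outer S _ PySem.Dict.nodup_keys_empty

-- the loop inside Python's min(prices, key=prices.get); PySem.List.min? is definitionally
-- this fold (pvMin?_eq below is rfl)
def pvMinStep (val : String → Int) (acc : Option String) (x : String) : Option String :=
  match acc with
  | none => some x
  | some m => if val x < val m then some x else some m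

lemma pvMin?_eq (xs : List String) (val : String → Int) :
    PySem.List.min? xs val = xs.foldl (pvMinStep val) none := by
  unfold PySem.List.min?
  congr 1
  funext acc x
  cases acc <;> rfl

lemma pvFoldMinMap (l : List (String × Int)) (val : String → Int) (accN : Option String) :
    (∀ e ∈ l, val e.1 = e.2) →
    l.foldl pvPairStep (accN.map (fun n => (n, val n))) =
      ((l.map Prod.fst).foldl (pvMinStep val) accN).map (fun n => (n, val n)) := by
  induction l generalizing accN with
  | nil => intro _; simp
  | cons e t ih =>
    intro hval
    have he : val e.1 = e.2 := hval e (List.mem_cons_self ..)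
    have step : pvPairStep (accN.map (fun n => (n, val n))) e
        = (pvMinStep val accN e.1).map (fun n => (n, val n)) := by
      cases accN with
      | none =>
        simp only [Option.map_none, Option.map_some, pvPairStep, pvMinStep, he]
      | some m =>
        simp only [Option.map_some, pvPairStep, pvMinStep]
        rw [he]
        by_cases hlt : e.2 < val m
        · rw [if_pos hlt, if_pos (he ▸ hlt)]
          simp [he]
        · rw [if_neg hlt, if_neg (he ▸ hlt)]
          rfl
    rw [List.foldl_cons, step, List.map_cons, List.foldl_cons,
      ih _ (fun x hx => hval x (List.mem_cons_of_mem _ hx))]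

lemma pvMinOfColList (l : List (String × Int)) (hnd : (l.map Prod.fst).Nodup) :
    l.foldl pvPairStep none =
      (PySem.List.min? (PySem.Dict.mk l).keys (fun s => (PySem.Dict.mk l).getD s 0)).map
        (fun n => (n, (PySem.Dict.mk l).getD n 0)) := by
  have hkeys : (PySem.Dict.mk l).keys = l.map Prod.fst := PySem.Dict.keys_mk l
  have hval : ∀ e ∈ l, (PySem.Dict.mk l).getD e.1 0 = e.2 := by
    intro e he
    exact PySem.Dict.getD_of_mem_items _
      (show (e.1, e.2) ∈ (PySem.Dict.mk l).items from he) (by rw [hkeys]; exact hnd) 0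
  have h := pvFoldMinMap l (fun s => (PySem.Dict.mk l).getD s 0) none hval
  rw [pvMin?_eq, hkeys]
  simpa using h

-- the fold over pvColList is none exactly on the empty column
lemma pvPairFoldNeNone (l : List (String × Int)) (b : String × Int) :
    l.foldl pvPairStep (some b) ≠ none := by
  induction l generalizing b with
  | nil => simp
  | cons e t ih =>
    rw [List.foldl_cons]
    have hred : pvPairStep (some b) e = if e.2 < b.2 then some e else some b := rfl
    rw [hred]
    by_cases hlt : e.2 < b.2
    · rw [if_pos hlt]; exact ih _
    · rw [if_neg hlt]; exact ih _

lemma pvPairFoldNoneIff (l : List (String × Int)) :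
    l.foldl pvPairStep none = none ↔ l = [] := by
  cases l with
  | nil => simp
  | cons e t =>
    simp only [List.foldl_cons]
    constructor
    · intro h
      exact absurd h (pvPairFoldNeNone t e)
    · intro h; exact absurd h (List.cons_ne_nil e t)

lemma pvBestAtEq (S : List (String × List Int)) (j : Nat) :
    pvBestAt S j = (pvColList S j).foldl pvPairStep none := by
  have gen : ∀ (acc : Option (String × Int)),
      S.foldl (pvBStep j) acc = (pvColList S j).foldl pvPairStep acc := by
    induction S with
    | nil => intro acc; rfl
    | cons sp t ih =>
      intro acc
      rw [List.foldl_cons, ih]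
      cases hp : sp.2[j]? with
      | none => simp [pvColList, List.filterMap_cons, hp, pvBStep]
      | some p =>
        simp only [pvColList, List.filterMap_cons, hp, Option.map_some, List.foldl_cons]
        congr 1
        simp only [pvBStep, hp]
        cases acc <;> rfl
  exact gen none

lemma pvIndexGetElem {H : List String} (hH : H.Nodup) {i : Nat} (hi : i < H.length) :
    PySem.List.index? H H[i] = some i := by
  rw [PySem.List.index?_eq_idxOf?, List.idxOf?_eq_some_iff]
  exact ⟨hi, rfl, fun j hj hEq => absurd ((List.Nodup.getElem_inj_iff hH).1 hEq) (by omega)⟩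

lemma pvColListFstSublist (S : List (String × List Int)) (j : Nat) :
    ((pvColList S j).map Prod.fst).Sublist (S.map Prod.fst) := by
  induction S with
  | nil => simp [pvColList]
  | cons sp t ih =>
    cases hp : sp.2[j]? with
    | none =>
      simp only [pvColList, List.filterMap_cons, hp, List.map_cons]
      exact (ih).cons _
    | some p =>
      simp only [pvColList, List.filterMap_cons, hp, List.map_cons]
      exact (ih).cons₂ _

lemma pvMemKeys (H : List String) (hH : H.Nodup) (S : List (String × List Int))
    (hN : (S.map Prod.fst).Nodup) (k : String) :
    k ∈ (S.foldl (pvBuildStep H) PySem.Dict.empty).keys ↔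
      ∃ j, PySem.List.index? H k = some j ∧ pvColList S j ≠ [] := by
  constructor
  · intro hk
    have hne : (S.foldl (pvBuildStep H) PySem.Dict.empty).get? k ≠ none := by
      intro h
      exact (PySem.Dict.get?_eq_none_iff_not_mem_keys _ _).1 h hk
    rw [pvBuildGet H hH S hN k] at hne
    cases hidx : PySem.List.index? H k with
    | none => simp only [hidx] at hne; simp at hne
    | some j =>
      simp only [hidx] at hne
      by_cases hemp : pvColList S j = []
      · rw [if_pos hemp] at hne; simp at hne
      · exact ⟨j, rfl, hemp⟩
  · rintro ⟨j, hidx, hcne⟩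
    by_contra hk
    have h0 := (PySem.Dict.get?_eq_none_iff_not_mem_keys
      (S.foldl (pvBuildStep H) PySem.Dict.empty) k).2 hk
    rw [pvBuildGet H hH S hN k] at h0
    simp only [hidx] at h0
    rw [if_neg hcne] at h0
    exact Option.some_ne_none _ h0

lemma pvAList (H : List String) (hH : H.Nodup) (S : List (String × List Int))
    (hN : (S.map Prod.fst).Nodup) :
    ((S.foldl (pvBuildStep H) PySem.Dict.empty).items.foldl pvAPick []) =
      (S.foldl (pvBuildStep H) PySem.Dict.empty).keys.map (pvF H S) := by
  have hbody : ∀ (acc : List (String × String × Int)) (x : String × PySem.Dict String Int),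
      pvAPick acc x =
        pvOptApp (fun x : String × PySem.Dict String Int =>
          (PySem.List.min? x.2.keys (fun s => x.2.getD s 0)).map
            (fun bs => (x.1, bs, x.2.getD bs 0))) acc x := by
    intro acc x
    unfold pvAPick pvOptApp
    cases h : PySem.List.min? x.2.keys (fun s => x.2.getD s 0) <;> simp [h]
  rw [PySem.List.foldl_congr_mem _ _ _ _ (fun acc x _ => hbody acc x),
    pvFoldlAppendOpt, List.nil_append,
    PySem.Dict.items_eq_map_keys _ (pvNodupKeysBuild H S) PySem.Dict.empty,
    List.filterMap_map]
  have hky : ∀ k ∈ (S.foldl (pvBuildStep H) PySem.Dict.empty).keys,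
      ((fun x : String × PySem.Dict String Int =>
          (PySem.List.min? x.2.keys (fun s => x.2.getD s 0)).map
            (fun bs => (x.1, bs, x.2.getD bs 0))) ∘
        (fun k => (k, (S.foldl (pvBuildStep H) PySem.Dict.empty).getD k PySem.Dict.empty))) k
        = some (pvF H S k) := by
    intro k hk
    obtain ⟨j, hidx, hcne⟩ := (pvMemKeys H hH S hN k).1 hk
    have hget : (S.foldl (pvBuildStep H) PySem.Dict.empty).get? k
        = some (PySem.Dict.mk (pvColList S j)) := by
      rw [pvBuildGet H hH S hN k]
      simp only [hidx]
      rw [if_neg hcne]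
    have hgetD : (S.foldl (pvBuildStep H) PySem.Dict.empty).getD k PySem.Dict.empty
        = PySem.Dict.mk (pvColList S j) := by
      rw [PySem.Dict.getD_eq_get?_getD, hget]
      rfl
    have hcolnd : ((pvColList S j).map Prod.fst).Nodup :=
      List.Nodup.sublist (pvColListFstSublist S j) hN
    have hmin := pvMinOfColList (pvColList S j) hcolnd
    simp only [Function.comp_apply, hgetD]
    unfold pvF
    rw [hidx]
    simp only [Option.getD_some]
    rw [hmin]
    cases hmm : PySem.List.min? (PySem.Dict.mk (pvColList S j)).keys
        (fun s => (PySem.Dict.mk (pvColList S j)).getD s 0) with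
    | none =>
      exfalso
      have hkeysnil : (PySem.Dict.mk (pvColList S j)).keys = [] :=
        (PySem.List.min?_eq_none_iff _ _).1 hmm
      rw [PySem.Dict.keys_mk] at hkeysnil
      exact hcne (List.map_eq_nil_iff.1 hkeysnil)
    | some m => simp
  rw [List.filterMap_congr hky]
  have : (fun k => some (pvF H S k)) = some ∘ (pvF H S) := rfl
  rw [this, List.filterMap_eq_map]

lemma pvFilterMapIf {α β : Type} (p : α → Bool) (f : α → β) (l : List α) :
    l.filterMap (fun x => if p x then none else some (f x)) =
      (l.filter (fun x => !p x)).map f := by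
  induction l with
  | nil => rfl
  | cons a t ih => by_cases h : p a <;> simp [h, ih]

lemma pvBList (H : List String) (hH : H.Nodup) (S : List (String × List Int)) :
    (PySem.List.enumerate H).foldl (pvBEmit S) [] =
      (((PySem.List.enumerate H).filter
          (fun jb => !decide (pvColList S jb.1.toNat = []))).map (fun jb => jb.2)).map
        (pvF H S) := by
  have hbody : ∀ (acc : List (String × String × Int)) (jb : Int × String),
      pvBEmit S acc jb =
        pvOptApp (fun jb : Int × String =>
          (pvBestAt S jb.1.toNat).map (fun b => (jb.2, b.1, b.2))) acc jb := by
    intro acc jb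
    unfold pvBEmit pvOptApp
    cases h : pvBestAt S jb.1.toNat <;> simp [h]
  rw [PySem.List.foldl_congr_mem _ _ _ _ (fun acc x _ => hbody acc x),
    pvFoldlAppendOpt, List.nil_append]
  have hcongr : ∀ jb ∈ PySem.List.enumerate H 0,
      (pvBestAt S jb.1.toNat).map (fun b => (jb.2, b.1, b.2)) =
        if decide (pvColList S jb.1.toNat = []) then none else some (pvF H S jb.2) := by
    intro jb hjb
    obtain ⟨i, hi, rfl⟩ := (PySem.List.mem_enumerate_iff H 0 jb).1 hjb
    have hto : ((0 : Int) + (i : Int)).toNat = i := by simp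
    rw [pvBestAtEq]
    simp only [hto]
    by_cases hemp : pvColList S i = []
    · simp [hemp]
    · rw [if_neg (by simpa using hemp)]
      cases hfold : (pvColList S i).foldl pvPairStep none with
      | none => exact absurd ((pvPairFoldNoneIff _).1 hfold) hemp
      | some b =>
        unfold pvF
        rw [pvIndexGetElem hH hi]
        simp only [Option.getD_some, hfold, Option.map_some]
  rw [List.filterMap_congr hcongr, pvFilterMapIf, List.map_map]
  rfl

-- ===== VERDICT (by name: the statement is the Claim_ definition above) =====
theorem find_best_deals_spec : Claim_equal_find_best_deals := by
  intro data _ hpre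
  obtain ⟨hne, hparse, hHnd, hNnd⟩ := hpre
  unfold Spec_find_best_deals
  show find_best_deals data = find_best_deals_alt data
  simp only [find_best_deals, find_best_deals_alt]
  rw [show pvSplitTabB = pvSplitTabA from rfl]
  set H : List String := pvSplitTabA (PySem.Str.slice (data.headD "") (some 1) none) with hHdef
  set S : List (String × List Int) := data.tail.map pvParseRow with hSdef
  have hH : H.Nodup := hHnd
  have hN : (S.map Prod.fst).Nodup := by
    rw [hSdef, List.map_map]
    exact hNnd
  have hfold : data.tail.foldl (pvABuild H) PySem.Dict.empty
      = S.foldl (pvBuildStep H) PySem.Dict.empty := by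
    rw [hSdef, List.foldl_map]
    exact PySem.List.foldl_congr_mem _ _ _ _ (fun acc x _ => rfl)
  rw [hfold, pvAList H hH S hN, pvBList H hH S]
  apply PySem.List.sorted_eq_of_perm_of_pairwise_lt
  · -- the two key lists enumerate the same books, without duplicates
    apply List.Perm.map
    refine (List.perm_ext_iff_of_nodup ?_ (pvNodupKeysBuild H S)).2 ?_
    · refine List.Nodup.sublist ?_ hH
      have hsub : (((PySem.List.enumerate H).filter
          (fun jb => !decide (pvColList S jb.1.toNat = []))).map (fun jb => jb.2)).Sublist
          ((PySem.List.enumerate H).map (fun jb => jb.2)) :=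
        List.Sublist.map _ List.filter_sublist
      rw [PySem.List.map_snd_enumerate] at hsub
      exact hsub
    · intro k
      rw [pvMemKeys H hH S hN k]
      simp only [List.mem_map, List.mem_filter]
      constructor
      · rintro ⟨jb, ⟨hjb, hq⟩, rfl⟩
        obtain ⟨i, hi, rfl⟩ := (PySem.List.mem_enumerate_iff H 0 jb).1 hjb
        refine ⟨i, pvIndexGetElem hH hi, ?_⟩
        simpa using hq
      · rintro ⟨j, hidx, hcne⟩
        obtain ⟨hj, hget, -⟩ := PySem.List.getElem_of_index?_eq_some hidx
        refine ⟨((0 : Int) + (j : Int), H[j]), ⟨?_, ?_⟩, hget⟩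
        · exact (PySem.List.mem_enumerate_iff H 0 _).2 ⟨j, hj, rfl⟩
        · simpa using hcne
  · -- the column-major result is strictly increasing in the header-index key
    rw [List.map_map, List.pairwise_map]
    have base : (((PySem.List.enumerate H).filter
        (fun jb => !decide (pvColList S jb.1.toNat = [])))).Pairwise (fun p q => p.1 < q.1) :=
      List.Pairwise.sublist List.filter_sublist (PySem.List.pairwise_lt_enumerate H 0)
    refine List.Pairwise.imp_of_mem ?_ base
    intro a b ha hb hab
    obtain ⟨i, hi, rfl⟩ :=
      (PySem.List.mem_enumerate_iff H 0 a).1 (List.mem_of_mem_filter ha)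
    obtain ⟨j, hj, rfl⟩ :=
      (PySem.List.mem_enumerate_iff H 0 b).1 (List.mem_of_mem_filter hb)
    simp only [Function.comp_apply, pvF_fst, pvIndexGetElem hH hi, pvIndexGetElem hH hj,
      Option.getD_some]
    simp only at hab
    omega
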